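-- pv_equiv track=rewrite | github.com/QunaSys/quri-parts | packages/circuit/quri_parts/circuit/utils/circuit_drawer.py | _create_lower_control_part
-- ===== SOURCE A (Python) =====
-- from typing import Sequence, Union
--
-- def _create_lower_control_part(
--     gate_string: list[str], control_idxs: Sequence[int], target_idxs: Sequence[int]
-- ) -> list[str]:
--     control_q_body = "   ●   "
--     vertical_wire = "   |   "
--
--     lower_ctrl_q_list: list[int] = [
--         idx for idx in control_idxs if idx > max(target_idxs)
--     ]
--
--     dist = max(lower_ctrl_q_list) - max(target_idxs)
--     loop = dist * 4 - 1
--     for _ in range(loop):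
--         gate_string.append(vertical_wire)
--
--     for i in lower_ctrl_q_list:
--         diff = i - max(target_idxs)
--         p = diff * 4 - loop - 2
--         gate_string[p] = control_q_body
--     return gate_string
-- ===== SOURCE B (Python) =====
-- def _create_lower_control_part(gate_string, control_idxs, target_idxs):
--     control_q_body = "   \u25cf   "
--     vertical_wire = "   |   "
--
--     t = max(target_idxs)
--     diffs = {idx - t for idx in control_idxs if idx > t}
--     loop = max(diffs) * 4 - 1
--     block = [
--         control_q_body if (j + 2) % 4 == 0 and (j + 2) // 4 in diffs else vertical_wire
--         for j in range(loop)
--     ]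
--     gate_string.extend(block)
--     return gate_string
-- ===== Notes on version B (the rewrite author's own statement) =====
-- stated objective: simpler
-- what changed: Instead of appending a run of vertical wires and then overwriting entries via negative-index assignment, B computes the set of control offsets once and constructs the appended block in a single pass (marker where (j+2) is a multiple of 4 hitting a control offset, wire elsewhere), then extends gate_string with the finished block.
import Mathlib
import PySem

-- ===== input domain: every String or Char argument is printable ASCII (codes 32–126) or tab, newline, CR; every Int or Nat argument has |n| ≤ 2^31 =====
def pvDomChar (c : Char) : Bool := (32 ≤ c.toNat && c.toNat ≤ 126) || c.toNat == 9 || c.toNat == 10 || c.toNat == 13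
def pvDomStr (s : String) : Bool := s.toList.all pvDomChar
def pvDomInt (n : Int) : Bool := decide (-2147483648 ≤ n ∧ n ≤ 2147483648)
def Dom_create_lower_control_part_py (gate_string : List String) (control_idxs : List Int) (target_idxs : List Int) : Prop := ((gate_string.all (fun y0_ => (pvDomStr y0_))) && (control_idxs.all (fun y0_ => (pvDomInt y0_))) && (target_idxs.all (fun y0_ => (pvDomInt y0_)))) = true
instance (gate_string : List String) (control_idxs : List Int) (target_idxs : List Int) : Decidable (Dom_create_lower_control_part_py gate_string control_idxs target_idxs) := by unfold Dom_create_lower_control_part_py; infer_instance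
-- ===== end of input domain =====

-- B builds the appended block in one pass (control marker where (j+2) is a multiple of 4 landing on a
-- control offset, wire elsewhere) instead of appending wires and overwriting by negative index; same
-- returned value. Both versions extend gate_string in place to the same final contents.

-- ===== PORT A =====
def create_lower_control_part_py (gate_string : List String) (control_idxs : List Int) (target_idxs : List Int) : List String :=
  let control_q_body := "   ●   "
  let vertical_wire := "   |   "
  let tmax := (PySem.List.max? target_idxs (fun x => x)).getD 0
  let lower_ctrl_q_list := control_idxs.filter (fun idx => decide (tmax < idx))
  let dist := (PySem.List.max? lower_ctrl_q_list (fun x => x)).getD 0 - tmax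
  let loop := dist * 4 - 1
  let gs := (PySem.List.pyRange 0 loop 1).foldl (fun acc _ => acc ++ [vertical_wire]) gate_string
  lower_ctrl_q_list.foldl
    (fun acc i => PySem.List.pySetD acc ((i - tmax) * 4 - loop - 2) control_q_body) gs

-- ===== PORT B =====
def create_lower_control_part_py_alt (gate_string : List String) (control_idxs : List Int) (target_idxs : List Int) : List String :=
  let control_q_body := "   ●   "
  let vertical_wire := "   |   "
  let t := (PySem.List.max? target_idxs (fun x => x)).getD 0
  let diffs : PySem.Set Int :=
    PySem.Set.ofList ((control_idxs.filter (fun idx => decide (t < idx))).map (fun idx => idx - t))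
  let loop := (PySem.List.max? diffs (fun x => x)).getD 0 * 4 - 1
  let block := (PySem.List.pyRange 0 loop 1).map (fun j =>
    if PySem.Int.mod (j + 2) 4 = 0 ∧ PySem.Int.floordiv (j + 2) 4 ∈ diffs
    then control_q_body else vertical_wire)
  gate_string ++ block

-- ===== PRECONDITION & SPEC =====
-- Pre_ excludes exactly the inputs where A raises ValueError: empty target_idxs, or no control index
-- strictly above every target index (max() of an empty sequence); B raises ValueError there too.
def Pre_create_lower_control_part_py (gate_string : List String) (control_idxs : List Int) (target_idxs : List Int) : Prop :=
  target_idxs ≠ [] ∧ ∃ c ∈ control_idxs, ∀ x ∈ target_idxs, x < c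

instance (gate_string : List String) (control_idxs : List Int) (target_idxs : List Int) : Decidable (Pre_create_lower_control_part_py gate_string control_idxs target_idxs) := by unfold Pre_create_lower_control_part_py; infer_instance

def pvWitness_create_lower_control_part_py : List String × List Int × List Int :=
  (["   |   "], [2], [1])

def Spec_create_lower_control_part_py (gate_string : List String) (control_idxs : List Int) (target_idxs : List Int) (out : List String) : Prop := out = create_lower_control_part_py_alt gate_string control_idxs target_idxs
instance (gate_string : List String) (control_idxs : List Int) (target_idxs : List Int) (out : List String) : Decidable (Spec_create_lower_control_part_py gate_string control_idxs target_idxs out) := by unfold Spec_create_lower_control_part_py; infer_instance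

-- ===== CLAIM (what is proved, stated in full; the proofs are below) =====
def Claim_equal_create_lower_control_part_py : Prop := ∀ (gate_string : List String) (control_idxs : List Int) (target_idxs : List Int), Dom_create_lower_control_part_py gate_string control_idxs target_idxs → Pre_create_lower_control_part_py gate_string control_idxs target_idxs → Spec_create_lower_control_part_py gate_string control_idxs target_idxs (create_lower_control_part_py gate_string control_idxs target_idxs)

-- ===== LEMMAS AND PROOFS =====

-- appending one element per iteration is appending a replicate block
lemma pv_foldl_append_singleton {α β : Type} (l : List α) (w : β) (gs : List β) :
    l.foldl (fun acc _ => acc ++ [w]) gs = gs ++ List.replicate l.length w := by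
  induction l generalizing gs with
  | nil => simp
  | cons a l ih =>
      rw [List.foldl_cons, ih, List.length_cons, List.replicate_succ]
      simp

-- Python assignment at a negative in-range index
lemma pv_pySetD_neg {α : Type} (xs : List α) (i : Int) (v : α)
    (h1 : -(xs.length : Int) ≤ i) (h2 : i < 0) :
    PySem.List.pySetD xs i v = xs.set ((xs.length : Int) + i).toNat v := by
  unfold PySem.List.pySetD PySem.List.pySet? PySem.List.pyIdx?
  rw [if_neg (by omega), if_pos (by omega)]
  have : xs.length - (-i).toNat = ((xs.length : Int) + i).toNat := by omega
  simp [this]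

-- the write loop, element by element: a position holds the written value iff some write targets it
lemma pv_foldl_pySetD_getElem? (v : String) (f : Int → Int) (ws : List Int) :
    ∀ (L : List String), (∀ i ∈ ws, -(L.length : Int) ≤ f i ∧ f i < 0) → ∀ (j : Nat),
    (ws.foldl (fun acc i => PySem.List.pySetD acc (f i) v) L)[j]? =
      if ∃ i ∈ ws, (j : Int) = (L.length : Int) + f i then some v else L[j]? := by
  induction ws with
  | nil => intro L h j; simp
  | cons a ws ih =>
      intro L h j
      obtain ⟨ha1, ha2⟩ := h a (List.mem_cons_self)
      rw [List.foldl_cons, pv_pySetD_neg L (f a) v ha1 ha2]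
      have hlen : (L.set ((L.length : Int) + f a).toNat v).length = L.length := by
        simp
      rw [ih (L.set ((L.length : Int) + f a).toNat v)
        (by intro i hi; rw [hlen]; exact h i (List.mem_cons_of_mem _ hi)) j, hlen]
      by_cases hex : ∃ i ∈ ws, (j : Int) = (L.length : Int) + f i
      · rw [if_pos hex]
        obtain ⟨i, hi, e⟩ := hex
        rw [if_pos ⟨i, List.mem_cons_of_mem _ hi, e⟩]
      · rw [if_neg hex]
        by_cases hja : (j : Int) = (L.length : Int) + f a
        · have hK : ((L.length : Int) + f a).toNat = j := by omega
          have hKlt : j < L.length := by omega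
          rw [if_pos ⟨a, List.mem_cons_self, hja⟩, hK]
          simp [hKlt]
        · have hne : ((L.length : Int) + f a).toNat ≠ j := by omega
          rw [if_neg (by
            rintro ⟨i, hi, e⟩
            rcases List.mem_cons.mp hi with rfl | hi'
            · exact hja e
            · exact hex ⟨i, hi', e⟩)]
          simp [hne]

-- the heart of the equivalence
lemma pv_core (gs : List String) (cs ts : List Int)
    (hpre : Pre_create_lower_control_part_py gs cs ts) :
    create_lower_control_part_py gs cs ts = create_lower_control_part_py_alt gs cs ts := by
  obtain ⟨hts, c, hc, hcall⟩ := hpre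
  -- max of target_idxs
  obtain ⟨tm, htm⟩ : ∃ tm, PySem.List.max? ts (fun x => x) = some tm := by
    cases hmax : PySem.List.max? ts (fun x => x) with
    | none => exact absurd ((PySem.List.max?_eq_none_iff ts _).mp hmax) hts
    | some tm => exact ⟨tm, rfl⟩
  have htm_mem : tm ∈ ts := PySem.List.max?_mem htm
  have htm_max : ∀ y ∈ ts, y ≤ tm := PySem.List.max?_isMax htm
  -- the list of lower controls
  set lower := cs.filter (fun idx => decide (tm < idx)) with hlower
  have hc_lower : c ∈ lower := by
    rw [hlower, List.mem_filter]
    exact ⟨hc, by simpa using hcall tm htm_mem⟩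
  have hlower_ne : lower ≠ [] := fun h => by simp [h] at hc_lower
  have hlower_gt : ∀ i ∈ lower, tm < i := by
    intro i hi
    rw [hlower, List.mem_filter] at hi
    simpa using hi.2
  -- max of the lower controls
  obtain ⟨m, hm⟩ : ∃ m, PySem.List.max? lower (fun x => x) = some m := by
    cases hmax : PySem.List.max? lower (fun x => x) with
    | none => exact absurd ((PySem.List.max?_eq_none_iff lower _).mp hmax) hlower_ne
    | some m => exact ⟨m, rfl⟩
  have hm_mem : m ∈ lower := PySem.List.max?_mem hm
  have hm_max : ∀ y ∈ lower, y ≤ m := PySem.List.max?_isMax hm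
  have htm_lt_m : tm < m := hlower_gt m hm_mem
  -- max of the diff set equals m - tm
  set diffs : PySem.Set Int := PySem.Set.ofList (lower.map (fun idx => idx - tm)) with hdiffs
  have hmem_diffs : ∀ z, z ∈ diffs ↔ ∃ i ∈ lower, i - tm = z := by
    intro z
    rw [hdiffs, PySem.Set.mem_ofList, List.mem_map]
  have hdiffs_ne : diffs ≠ [] := by
    intro h
    have := (hmem_diffs (m - tm)).mpr ⟨m, hm_mem, rfl⟩
    simp [h] at this
  obtain ⟨md, hmd⟩ : ∃ md, PySem.List.max? diffs (fun x => x) = some md := by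
    cases hmax : PySem.List.max? diffs (fun x => x) with
    | none => exact absurd ((PySem.List.max?_eq_none_iff diffs _).mp hmax) hdiffs_ne
    | some md => exact ⟨md, rfl⟩
  have hmd_val : md = m - tm := by
    obtain ⟨i, hi, e⟩ := (hmem_diffs md).mp (PySem.List.max?_mem hmd)
    have h1 : md ≤ m - tm := by have := hm_max i hi; omega
    have h2 : m - tm ≤ md :=
      PySem.List.max?_isMax hmd (m - tm) ((hmem_diffs (m - tm)).mpr ⟨m, hm_mem, rfl⟩)
    omega
  -- abbreviations
  set d : Int := m - tm with hd
  have hd1 : 1 ≤ d := by omega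
  set Lp : Int := d * 4 - 1 with hLp
  have hLp3 : 3 ≤ Lp := by omega
  -- unfold both sides
  simp only [create_lower_control_part_py, create_lower_control_part_py_alt, htm,
    Option.getD_some]
  simp only [← hlower]
  simp only [hm, Option.getD_some]
  simp only [← hdiffs]
  simp only [hmd, Option.getD_some, hmd_val, ← hd, ← hLp]
  -- the wire-appending loop is an append of a replicate block
  have hbase : (PySem.List.pyRange 0 Lp 1).foldl (fun acc _ => acc ++ ["   |   "]) gs
      = gs ++ List.replicate Lp.toNat "   |   " := by
    rw [pv_foldl_append_singleton, PySem.List.length_pyRange_one]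
    norm_num
  rw [hbase]
  have hbl : ((gs ++ List.replicate Lp.toNat "   |   ").length : Int) = gs.length + Lp := by
    simp
    omega
  -- elementwise comparison
  apply List.ext_getElem?
  intro j
  rw [pv_foldl_pySetD_getElem? "   ●   " (fun i => (i - tm) * 4 - Lp - 2) lower
    (gs ++ List.replicate Lp.toNat "   |   ")
    (by
      intro i hi
      have h1 := hlower_gt i hi
      have h2 := hm_max i hi
      simp only []
      constructor <;> omega) j]
  by_cases hj1 : j < gs.length
  · -- positions inside the original gate string: untouched on both sides
    rw [if_neg (by
      rintro ⟨i, hi, e⟩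
      have h1 := hlower_gt i hi
      omega)]
    rw [List.getElem?_append_left hj1, List.getElem?_append_left hj1]
  · have hj1' : gs.length ≤ j := le_of_not_gt hj1
    have hjk : (j : Int) = gs.length + ((j - gs.length : Nat) : Int) := by omega
    rw [List.getElem?_append_right hj1', List.getElem?_append_right hj1',
      List.getElem?_map, PySem.List.getElem?_pyRange_one, List.getElem?_replicate, sub_zero]
    by_cases hk : j - gs.length < Lp.toNat
    · -- positions inside the appended block
      rw [if_pos hk, if_pos hk, Option.map_some]
      have hcond : (∃ i ∈ lower, (j : Int) =
            ((gs ++ List.replicate Lp.toNat "   |   ").length : Int) + ((i - tm) * 4 - Lp - 2))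
          ↔ (PySem.Int.mod (0 + ((j - gs.length : Nat) : Int) + 2) 4 = 0 ∧
             PySem.Int.floordiv (0 + ((j - gs.length : Nat) : Int) + 2) 4 ∈ diffs) := by
        rw [PySem.Int.mod_eq_emod_of_pos (by norm_num),
          PySem.Int.floordiv_eq_ediv_of_pos (by norm_num)]
        constructor
        · rintro ⟨i, hi, e⟩
          rw [hbl] at e
          refine ⟨by omega, (hmem_diffs _).mpr ⟨i, hi, by omega⟩⟩
        · rintro ⟨hmod, hmem⟩
          obtain ⟨i, hi, hz⟩ := (hmem_diffs _).mp hmem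
          exact ⟨i, hi, by rw [hbl]; omega⟩
      by_cases hival : ∃ i ∈ lower, (j : Int) =
          ((gs ++ List.replicate Lp.toNat "   |   ").length : Int) + ((i - tm) * 4 - Lp - 2)
      · rw [if_pos hival, if_pos (hcond.mp hival)]
      · rw [if_neg hival, if_neg (fun h => hival (hcond.mpr h))]
    · -- positions beyond the block: none on both sides
      rw [if_neg (by
        rintro ⟨i, hi, e⟩
        have h2 := hm_max i hi
        have h1 := hlower_gt i hi
        rw [hbl] at e
        omega)]
      rw [if_neg hk, if_neg hk, Option.map_none]

-- ===== VERDICT (by name: the statement is the Claim_ definition above) =====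
theorem create_lower_control_part_py_spec : Claim_equal_create_lower_control_part_py := by
  intro gs cs ts _ hpre
  exact pv_core gs cs ts hpre
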